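-- pv_equiv track=rewrite | github.com/JustinFoong/2025-recruitment-technical-assessment | backend/py_template/devdonalds.py | parse_handwriting
-- ===== SOURCE A (Python) =====
-- from typing import List, Optional, Dict, Any, Tuple
--
-- def parse_handwriting(recipeName: str) -> Optional[str]:
--     """Format recipe names according to requirements"""
--
--     if not recipeName or not recipeName.strip():
--         return None
--
--     # replacement of unwanted characters
--     processed = recipeName.replace('-', ' ').replace('_', ' ')
--     processed = ''.join(char for char in processed if char.isalpha() or char.isspace())
--     words = processed.strip().split()
--
--     if not words:
--         return None
--
--     # capitalises the first letter for every word
--     words = [word.capitalize() for word in words]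
--     return ' '.join(words)
--
-- # [TASK 2] =======================================
--     """
--     Adds stuff to cookbook
--
--     Raises:
--         ValueError: _description_
--         TypeError: _description_
--
--     Returns:
--         _type_: _description_
--     """
-- ===== SOURCE B (Python) =====
-- def parse_handwriting(recipeName):
--     """Format recipe names: one scan with a word buffer instead of the replace/filter/split pipeline."""
--     words = []
--     buf = []
--     for ch in recipeName:
--         if ch == '-' or ch == '_' or ch.isspace():
--             if buf:
--                 words.append(''.join(buf))
--                 buf = []
--         elif ch.isalpha():
--             buf.append(ch)
--     if buf:
--         words.append(''.join(buf))
--     if not words: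
--         return None
--     return ' '.join(w.capitalize() for w in words)
-- ===== Notes on version B (the rewrite author's own statement) =====
-- stated objective: alternative
-- what changed: Replaces A's four-pass replace/replace/filter/strip-split pipeline with a single scan over the characters that maintains a current-word buffer and flushes it at dash/underscore/whitespace separators.
import Mathlib
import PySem

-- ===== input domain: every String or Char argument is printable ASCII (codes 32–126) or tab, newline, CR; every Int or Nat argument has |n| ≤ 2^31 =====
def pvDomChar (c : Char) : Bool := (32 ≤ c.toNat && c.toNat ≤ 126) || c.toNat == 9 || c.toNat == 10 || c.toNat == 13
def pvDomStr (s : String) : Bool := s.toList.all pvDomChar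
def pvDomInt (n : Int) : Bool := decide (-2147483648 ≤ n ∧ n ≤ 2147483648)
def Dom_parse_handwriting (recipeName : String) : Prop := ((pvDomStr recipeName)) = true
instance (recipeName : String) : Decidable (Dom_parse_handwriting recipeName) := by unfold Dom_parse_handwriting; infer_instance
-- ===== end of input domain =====

-- B changes the decomposition only (single scan with a word buffer instead of A's replace/filter/strip-split pipeline); same cost, no speed claim.

-- ===== PORT A =====
-- word.capitalize() (both Pythons call str.capitalize): first char uppercased, rest lowercased
def pvCapWord (w : List Char) : List Char :=
  match w with
  | [] => []
  | c :: rest => PySem.Chars.upperChar c :: rest.map PySem.Chars.lowerChar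

def parse_handwriting (recipeName : String) : Option String :=
  let cs := recipeName.toList
  if cs.isEmpty || (PySem.Chars.strip cs).isEmpty then none
  else
    let processed := PySem.Chars.replace (PySem.Chars.replace cs ['-'] [' ']) ['_'] [' ']
    let processed2 := processed.filter (fun c => PySem.Chars.isalpha c || PySem.Chars.isspace c)
    let words := PySem.Chars.split₀ (PySem.Chars.strip processed2)
    if words.isEmpty then none
    else some (String.ofList (PySem.Chars.join [' '] (words.map pvCapWord)))

-- ===== PORT B =====
-- one step of B's for-loop: flush the buffer at a separator, extend it on a letter, else skip
def pvStep (st : List (List Char) × List Char) (c : Char) : List (List Char) × List Char :=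
  if c == '-' || c == '_' || PySem.Chars.isspace c then
    if st.2.isEmpty then (st.1, []) else (st.1 ++ [st.2], [])
  else if PySem.Chars.isalpha c then (st.1, st.2 ++ [c])
  else st

def parse_handwriting_alt (recipeName : String) : Option String :=
  let st := recipeName.toList.foldl pvStep ([], [])
  let words := if st.2.isEmpty then st.1 else st.1 ++ [st.2]
  if words.isEmpty then none
  else some (String.ofList (PySem.Chars.join [' '] (words.map pvCapWord)))

-- ===== PRECONDITION & SPEC =====
def Spec_parse_handwriting (recipeName : String) (out : Option String) : Prop := out = parse_handwriting_alt recipeName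
instance (recipeName : String) (out : Option String) : Decidable (Spec_parse_handwriting recipeName out) := by unfold Spec_parse_handwriting; infer_instance

-- ===== CLAIM (what is proved, stated in full; the proofs are below) =====
def Claim_equal_parse_handwriting : Prop := ∀ (recipeName : String), Dom_parse_handwriting recipeName → Spec_parse_handwriting recipeName (parse_handwriting recipeName)

-- ===== LEMMAS AND PROOFS =====

-- the per-character effect of A's replace/replace/filter passes
def pvF (c : Char) : Option Char :=
  if c = '-' ∨ c = '_' then some ' '
  else if PySem.Chars.isalpha c || PySem.Chars.isspace c then some c else none

-- the common word list: split on whitespace runs, starting with buffer buf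
def pvW : List Char → List Char → List (List Char)
  | [], buf => if buf = [] then [] else [buf]
  | c :: cs, buf =>
      if PySem.Chars.isspace c then (if buf = [] then pvW cs [] else buf :: pvW cs [])
      else pvW cs (buf ++ [c])

theorem pv_sp_blank : PySem.Chars.isspace ' ' = true := by decide
theorem pv_sp_dash : PySem.Chars.isspace '-' = false := by decide
theorem pv_sp_us : PySem.Chars.isspace '_' = false := by decide
theorem pv_f_dash : pvF '-' = some ' ' := by decide
theorem pv_f_us : pvF '_' = some ' ' := by decide

theorem pv_go_eq (s : List Char) : ∀ cur acc,
    PySem.Chars.split₀.go s cur acc = acc.reverse ++ pvW s cur.reverse := by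
  induction s with
  | nil =>
    intro cur acc
    by_cases h : cur = [] <;>
      simp [PySem.Chars.split₀.go, pvW, h, List.isEmpty_iff]
  | cons c rest ih =>
    intro cur acc
    by_cases hs : PySem.Chars.isspace c = true
    · by_cases hc : cur = []
      · simp [PySem.Chars.split₀.go, pvW, hs, hc, ih]
      · simp [PySem.Chars.split₀.go, pvW, hs, hc, List.isEmpty_iff, ih]
    · simp [PySem.Chars.split₀.go, pvW, hs, ih]

theorem pv_split₀_eq (s : List Char) : PySem.Chars.split₀ s = pvW s [] := by
  simpa using pv_go_eq s [] []

theorem pv_replace_go_single (a b : Char) (s : List Char) : ∀ fuel acc, s.length ≤ fuel →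
    PySem.Chars.replace.go [a] [b] fuel s acc
      = acc.reverse ++ s.map (fun c => if c = a then b else c) := by
  induction s with
  | nil =>
    intro fuel acc _
    cases fuel <;> simp [PySem.Chars.replace.go]
  | cons c t ih =>
    intro fuel acc hlen
    cases fuel with
    | zero => simp at hlen
    | succ fuel =>
      by_cases h : c = a
      · simp [PySem.Chars.replace.go, List.isPrefixOf, h, ih fuel (b :: acc) (by simpa using hlen)]
      · have h' : (a == c) = false := beq_eq_false_iff_ne.mpr (fun hh => h hh.symm)
        simp [PySem.Chars.replace.go, List.isPrefixOf, h, h', ih fuel (c :: acc) (by simpa using hlen)]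

theorem pv_replace_single (a b : Char) (s : List Char) :
    PySem.Chars.replace s [a] [b] = s.map (fun c => if c = a then b else c) := by
  simpa [PySem.Chars.replace] using pv_replace_go_single a b s s.length [] le_rfl

theorem pv_filtered_eq (cs : List Char) :
    ((cs.map (fun c => if c = '-' then ' ' else c)).map (fun c => if c = '_' then ' ' else c)).filter
        (fun c => PySem.Chars.isalpha c || PySem.Chars.isspace c)
      = cs.filterMap pvF := by
  induction cs with
  | nil => rfl
  | cons c rest ih =>
    simp only [List.map_cons, List.filter_cons, List.filterMap_cons]
    by_cases h1 : c = '-'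
    · subst h1
      simp only [pv_f_dash]
      have hne : ((' ' : Char) = '_') = False := by simp
      simp [hne, pv_sp_blank]
      simpa [List.map_map] using ih
    · by_cases h2 : c = '_'
      · subst h2
        simp only [pv_f_us]
        have hne : (('_' : Char) = '-') = False := by simp
        simp [hne, pv_sp_blank]
        simpa [List.map_map] using ih
      · simp only [if_neg h1, if_neg h2]
        have hf : pvF c = if PySem.Chars.isalpha c || PySem.Chars.isspace c then some c else none := by
          simp [pvF, h1, h2]
        by_cases hk : (PySem.Chars.isalpha c || PySem.Chars.isspace c) = true <;>
          · simp [hk, hf]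
            simpa [List.map_map] using ih

theorem pv_W_allspace (t : List Char) : ∀ buf, (∀ c ∈ t, PySem.Chars.isspace c = true) →
    pvW t buf = if buf = [] then [] else [buf] := by
  induction t with
  | nil => intro buf _; simp [pvW]
  | cons c rest ih =>
    intro buf h
    have hc := h c (by simp)
    have hr : ∀ d ∈ rest, PySem.Chars.isspace d = true := fun d hd => h d (by simp [hd])
    by_cases hb : buf = [] <;> simp [pvW, hc, hb, ih [] hr]

theorem pv_W_append_space (s : List Char) : ∀ buf t, (∀ c ∈ t, PySem.Chars.isspace c = true) →
    pvW (s ++ t) buf = pvW s buf := by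
  induction s with
  | nil =>
    intro buf t h
    simpa [pvW] using pv_W_allspace t buf h
  | cons c rest ih =>
    intro buf t h
    by_cases hs : PySem.Chars.isspace c = true <;> simp [pvW, hs, ih _ t h]

theorem pv_W_lstrip (s : List Char) :
    pvW (List.dropWhile PySem.Chars.isspace s) [] = pvW s [] := by
  induction s with
  | nil => rfl
  | cons c rest ih =>
    by_cases hs : PySem.Chars.isspace c = true
    · simpa [List.dropWhile, hs, pvW] using ih
    · simp [List.dropWhile, hs]

theorem pv_W_strip (s : List Char) : pvW (PySem.Chars.strip s) [] = pvW s [] := by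
  have h2 : ∀ u : List Char, pvW (List.rdropWhile PySem.Chars.isspace u) [] = pvW u [] := by
    intro u
    conv_rhs => rw [← List.rdropWhile_append_rtakeWhile (p := PySem.Chars.isspace) (l := u)]
    exact (pv_W_append_space _ _ _ (fun c hc => List.mem_rtakeWhile_imp hc)).symm
  calc pvW (PySem.Chars.strip s) [] = pvW (PySem.Chars.lstrip s) [] := h2 (PySem.Chars.lstrip s)
    _ = pvW s [] := pv_W_lstrip s

theorem pv_scan_eq (cs : List Char) : ∀ ws buf,
    (if (List.foldl pvStep (ws, buf) cs).2 = [] then (List.foldl pvStep (ws, buf) cs).1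
     else (List.foldl pvStep (ws, buf) cs).1 ++ [(List.foldl pvStep (ws, buf) cs).2])
      = ws ++ pvW (cs.filterMap pvF) buf := by
  induction cs with
  | nil =>
    intro ws buf
    by_cases hb : buf = [] <;> simp [pvW, hb]
  | cons c rest ih =>
    intro ws buf
    simp only [List.foldl_cons, List.filterMap_cons]
    by_cases h1 : c = '-'
    · subst h1
      by_cases hb : buf = [] <;>
        simp [pvStep, pv_f_dash, pvW, pv_sp_blank, hb, List.isEmpty_iff, ih]
    · by_cases h2 : c = '_'
      · subst h2
        by_cases hb : buf = [] <;>
          simp [pvStep, pv_f_us, pvW, pv_sp_blank, hb, List.isEmpty_iff, ih]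
      · by_cases hs : PySem.Chars.isspace c = true
        · have hf : pvF c = some c := by simp [pvF, h1, h2, hs]
          by_cases hb : buf = [] <;>
            simp [pvStep, hf, pvW, hs, hb, List.isEmpty_iff, ih]
        · by_cases ha : PySem.Chars.isalpha c = true
          · have hf : pvF c = some c := by simp [pvF, h1, h2, ha]
            simp [pvStep, hf, pvW, h1, h2, hs, ha, ih]
          · have hf : pvF c = none := by simp [pvF, h1, h2, ha, hs]
            simp [pvStep, hf, h1, h2, hs, ha, ih]

theorem pv_strip_nil_all_space (cs : List Char) (h : PySem.Chars.strip cs = []) :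
    ∀ c ∈ cs, PySem.Chars.isspace c = true := by
  intro c hc
  have h' : ∀ d ∈ List.dropWhile PySem.Chars.isspace cs, PySem.Chars.isspace d = true := by
    rw [← List.rdropWhile_eq_nil_iff]
    exact h
  have hsplit := List.takeWhile_append_dropWhile (p := PySem.Chars.isspace) (l := cs)
  rw [← hsplit] at hc
  rcases List.mem_append.mp hc with h'' | h''
  · exact List.mem_takeWhile_imp h''
  · exact h' c h''

theorem pv_filterMap_space (cs : List Char) (h : ∀ c ∈ cs, PySem.Chars.isspace c = true) :
    ∀ d ∈ cs.filterMap pvF, PySem.Chars.isspace d = true := by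
  intro d hd
  rcases List.mem_filterMap.mp hd with ⟨c, hc, hfc⟩
  have hcs := h c hc
  by_cases h1 : c = '-' ∨ c = '_'
  · rcases h1 with h1 | h1 <;> subst h1 <;> simp [pv_sp_dash, pv_sp_us] at hcs
  · simp [pvF, h1, hcs] at hfc
    exact hfc ▸ hcs

theorem pv_alt_eq (r : String) : parse_handwriting_alt r =
    (if (pvW (r.toList.filterMap pvF) []).isEmpty then none
     else some (String.ofList (PySem.Chars.join [' ']
       ((pvW (r.toList.filterMap pvF) []).map pvCapWord)))) := by
  have h := pv_scan_eq r.toList [] []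
  simp only [List.nil_append] at h
  simp only [parse_handwriting_alt, List.isEmpty_iff]
  rw [h]

theorem pv_a_eq (r : String) (hne : ¬ (r.toList.isEmpty || (PySem.Chars.strip r.toList).isEmpty) = true) :
    parse_handwriting r =
    (if (pvW (r.toList.filterMap pvF) []).isEmpty then none
     else some (String.ofList (PySem.Chars.join [' ']
       ((pvW (r.toList.filterMap pvF) []).map pvCapWord)))) := by
  have hwords :
      PySem.Chars.split₀ (PySem.Chars.strip
        ((PySem.Chars.replace (PySem.Chars.replace r.toList ['-'] [' ']) ['_'] [' ']).filter
          (fun c => PySem.Chars.isalpha c || PySem.Chars.isspace c)))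
        = pvW (r.toList.filterMap pvF) [] := by
    rw [pv_replace_single, pv_replace_single, pv_filtered_eq, pv_split₀_eq, pv_W_strip]
  simp only [parse_handwriting, if_neg hne]
  rw [hwords]

-- ===== VERDICT (by name: the statement is the Claim_ definition above) =====
theorem parse_handwriting_spec : Claim_equal_parse_handwriting := by
  intro r _
  unfold Spec_parse_handwriting
  rw [pv_alt_eq]
  by_cases hg : (r.toList.isEmpty || (PySem.Chars.strip r.toList).isEmpty) = true
  · -- A returns None early; the scan finds no word either, so the common word list is empty
    have hstrip : PySem.Chars.strip r.toList = [] := by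
      rcases Bool.or_eq_true_iff.mp hg with h | h
      · have : r.toList = [] := by simpa [List.isEmpty_iff] using h
        simp [this, PySem.Chars.strip, PySem.Chars.lstrip, PySem.Chars.rstrip]
      · simpa [List.isEmpty_iff] using h
    have hWnil : pvW (r.toList.filterMap pvF) [] = [] := by
      simpa using pv_W_allspace (r.toList.filterMap pvF) []
        (pv_filterMap_space r.toList (pv_strip_nil_all_space r.toList hstrip))
    simp only [parse_handwriting, if_pos hg]
    simp [hWnil]
  · rw [pv_a_eq r hg]
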